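-- pv_equiv track=rewrite | github.com/FranciscoJimenezJimenez24/CalendarioAdvientoPY2025 | dia13.py | run_factory
-- ===== SOURCE A (Python) =====
-- def run_factory(factory: list[str]) -> str:
--   visited = set()
--   i = j = 0
--   while (0 <= i < len(factory) and 0 <= j < len(factory[i])):
--     if (i, j) in visited: return "loop"
--     visited.add((i, j))
--
--     if (factory[i][j] == "."): return "completed"
--     elif (factory[i][j] == ">"):
--       j+=1
--     elif (factory[i][j] == "<"):
--       j-=1
--     elif (factory[i][j] == "v"):
--       i+=1
--     else:
--       i-=1
--   return 'broken'
-- ===== SOURCE B (Python) =====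
-- def run_factory(factory: list[str]) -> str:
--     # Floyd tortoise-and-hare: O(1) extra memory instead of a visited set.
--     # step returns (verdict, None) at a terminal cell, or (None, next position).
--     def step(i, j):
--         if not (0 <= i < len(factory) and 0 <= j < len(factory[i])):
--             return ("broken", None)
--         c = factory[i][j]
--         if c == ".":
--             return ("completed", None)
--         if c == ">":
--             return (None, (i, j + 1))
--         if c == "<":
--             return (None, (i, j - 1))
--         if c == "v":
--             return (None, (i + 1, j))
--         return (None, (i - 1, j))
--
--     slow = fast = (0, 0)
--     while True:
--         v, nxt = step(*fast)
--         if v is not None: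
--             return v
--         fast = nxt
--         v, nxt = step(*fast)
--         if v is not None:
--             return v
--         fast = nxt
--         v, nxt = step(*slow)
--         if v is not None:
--             return v
--         slow = nxt
--         if slow == fast:
--             return "loop"
-- ===== Notes on version B (the rewrite author's own statement) =====
-- stated objective: alternative
-- what changed: Replaces the visited-set cycle detection by Floyd's tortoise-and-hare: a step helper returns a terminal verdict or the next cell, a fast pointer advances two micro-steps and a slow pointer one per iteration, terminal verdicts are checked on every micro-step, and 'loop' is returned when the pointers meet, using O(1) extra memory instead of a set of all visited cells.
import Mathlib
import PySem

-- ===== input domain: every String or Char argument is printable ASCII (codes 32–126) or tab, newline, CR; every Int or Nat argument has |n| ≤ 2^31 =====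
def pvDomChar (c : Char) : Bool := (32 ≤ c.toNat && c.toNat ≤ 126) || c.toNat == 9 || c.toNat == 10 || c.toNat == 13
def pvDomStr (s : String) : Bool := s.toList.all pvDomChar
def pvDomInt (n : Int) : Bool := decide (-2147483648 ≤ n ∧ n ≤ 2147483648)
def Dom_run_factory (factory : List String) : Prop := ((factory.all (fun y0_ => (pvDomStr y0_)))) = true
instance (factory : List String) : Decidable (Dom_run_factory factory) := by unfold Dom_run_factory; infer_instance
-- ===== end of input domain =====

-- B replaces A's visited-set loop detection by Floyd's tortoise-and-hare cycle detection
-- (a step helper plus a slow and a double-speed pointer, O(1) extra state); equal return value.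

-- ===== PORT A =====
-- A's while loop becomes fuel recursion; fuel = (number of grid cells)+1 suffices because
-- each non-returning iteration adds a fresh in-grid cell to `visited` (proved in the lemmas).
def pvRunA (factory : List String) : Nat → PySem.Set (Int × Int) → Int → Int → String
  | 0, _, _, _ => "loop"  -- unreachable with the fuel below
  | fuel + 1, visited, i, j =>
    if 0 ≤ i ∧ i < (factory.length : Int) ∧ 0 ≤ j ∧ j < (((factory.getD i.toNat "").toList.length : Int)) then
      if visited.contains (i, j) then "loop"
      else
        let visited' := PySem.Set.add visited (i, j)
        let c := (factory.getD i.toNat "").toList.getD j.toNat ' '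
        if c = '.' then "completed"
        else if c = '>' then pvRunA factory fuel visited' i (j + 1)
        else if c = '<' then pvRunA factory fuel visited' i (j - 1)
        else if c = 'v' then pvRunA factory fuel visited' (i + 1) j
        else pvRunA factory fuel visited' (i - 1) j
    else "broken"

def run_factory (factory : List String) : String :=
  pvRunA factory ((factory.map (fun r => r.toList.length)).sum + 1) PySem.Set.empty 0 0

-- ===== PORT B =====
-- B's `step` helper: a terminal verdict (.inl) or the next cell (.inr).
def pvStep (factory : List String) (i j : Int) : Sum String (Int × Int) :=
  if ¬ (0 ≤ i ∧ i < (factory.length : Int) ∧ 0 ≤ j ∧ j < (((factory.getD i.toNat "").toList.length : Int))) then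
    .inl "broken"
  else
    let c := (factory.getD i.toNat "").toList.getD j.toNat ' '
    if c = '.' then .inl "completed"
    else if c = '>' then .inr (i, j + 1)
    else if c = '<' then .inr (i, j - 1)
    else if c = 'v' then .inr (i + 1, j)
    else .inr (i - 1, j)

-- B's `while True` becomes fuel recursion; with fuel = (number of grid cells)+1 the
-- tortoise and hare are proved below to meet (or a verdict to occur) before fuel runs out.
def pvFloyd (factory : List String) : Nat → (Int × Int) → (Int × Int) → String
  | 0, _, _ => "loop"  -- unreachable with the fuel below
  | fuel + 1, slow, fast =>
    match pvStep factory fast.1 fast.2 with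
    | .inl v => v
    | .inr f1 =>
      match pvStep factory f1.1 f1.2 with
      | .inl v => v
      | .inr f2 =>
        match pvStep factory slow.1 slow.2 with
        | .inl v => v
        | .inr s1 => if s1 = f2 then "loop" else pvFloyd factory fuel s1 f2

def run_factory_alt (factory : List String) : String :=
  pvFloyd factory ((factory.map (fun r => r.toList.length)).sum + 1) (0, 0) (0, 0)

-- ===== PRECONDITION & SPEC =====
def Spec_run_factory (factory : List String) (out : String) : Prop := out = run_factory_alt factory
instance (factory : List String) (out : String) : Decidable (Spec_run_factory factory out) := by unfold Spec_run_factory; infer_instance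

-- ===== CLAIM (what is proved, stated in full; the proofs are below) =====
def Claim_equal_run_factory : Prop := ∀ (factory : List String), Dom_run_factory factory → Spec_run_factory factory (run_factory factory)

-- ===== LEMMAS AND PROOFS =====

/-- In-bounds predicate matching both ports' guard. -/
def pvInB (factory : List String) (i j : Int) : Prop :=
  0 ≤ i ∧ i < (factory.length : Int) ∧ 0 ≤ j ∧ j < (((factory.getD i.toNat "").toList.length : Int))

theorem pvStep_in (factory : List String) (i j : Int) (hib : pvInB factory i j) :
    pvStep factory i j =
      (if (factory.getD i.toNat "").toList.getD j.toNat ' ' = '.' then Sum.inl "completed"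
       else if (factory.getD i.toNat "").toList.getD j.toNat ' ' = '>' then Sum.inr (i, j + 1)
       else if (factory.getD i.toNat "").toList.getD j.toNat ' ' = '<' then Sum.inr (i, j - 1)
       else if (factory.getD i.toNat "").toList.getD j.toNat ' ' = 'v' then Sum.inr (i + 1, j)
       else Sum.inr (i - 1, j)) := by
  have h' : ¬¬(0 ≤ i ∧ i < (factory.length : Int) ∧ 0 ≤ j ∧ j < (((factory.getD i.toNat "").toList.length : Int))) :=
    not_not_intro hib
  unfold pvStep
  rw [if_neg h']

theorem pvStep_out (factory : List String) (i j : Int) (hib : ¬ pvInB factory i j) :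
    pvStep factory i j = Sum.inl "broken" := by
  unfold pvStep
  rw [if_pos (show ¬(0 ≤ i ∧ i < (factory.length : Int) ∧ 0 ≤ j ∧ j < (((factory.getD i.toNat "").toList.length : Int))) from hib)]

theorem pvStep_inB {factory : List String} {i j : Int} {p : Int × Int}
    (h : pvStep factory i j = .inr p) : pvInB factory i j := by
  by_cases hib : pvInB factory i j
  · exact hib
  · rw [pvStep_out factory i j hib] at h
    exact absurd h (by simp)

/-- Proof-side counted walk: one micro-check per fuel unit. -/
def pvCnt (factory : List String) : Nat → Int → Int → String
  | 0, _, _ => "loop"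
  | fuel + 1, i, j =>
    match pvStep factory i j with
    | .inl v => v
    | .inr p => pvCnt factory fuel p.1 p.2

theorem pvCnt_succ (factory : List String) (fuel : Nat) (i j : Int) :
    pvCnt factory (fuel + 1) i j =
      match pvStep factory i j with
      | .inl v => v
      | .inr p => pvCnt factory fuel p.1 p.2 := rfl

/-- k-fold iteration of pvStep; none if a terminal verdict occurs on the way. -/
def pvReach (factory : List String) : Nat → Int → Int → Option (Int × Int)
  | 0, i, j => some (i, j)
  | k + 1, i, j =>
    match pvStep factory i j with
    | .inl _ => none
    | .inr p => pvReach factory k p.1 p.2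

theorem pvReach_one_eq (factory : List String) (i j : Int) :
    pvReach factory 1 i j =
      match pvStep factory i j with
      | .inl _ => none
      | .inr p => some p := rfl

theorem pvReach_one {factory : List String} {i j : Int} {r : Int × Int}
    (h : pvReach factory 1 i j = some r) : pvStep factory i j = .inr r := by
  rw [pvReach_one_eq] at h
  cases hs : pvStep factory i j with
  | inl v => rw [hs] at h; exact absurd h (by simp)
  | inr p => rw [hs] at h; simp at h; rw [h]

theorem pvStep_reach_one {factory : List String} {i j : Int} {r : Int × Int}
    (h : pvStep factory i j = .inr r) : pvReach factory 1 i j = some r := by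
  rw [pvReach_one_eq, h]

theorem pvReach_add (factory : List String) (m : Nat) : ∀ (n : Nat) (i j : Int),
    pvReach factory (m + n) i j = (pvReach factory m i j).bind (fun p => pvReach factory n p.1 p.2) := by
  induction m with
  | zero => intro n i j; simp [pvReach]
  | succ m ih =>
    intro n i j
    rw [show m + 1 + n = (m + n) + 1 from by omega]
    rw [pvReach, pvReach]
    cases pvStep factory i j with
    | inl v => rfl
    | inr p => exact ih n p.1 p.2

theorem pvReach_split {factory : List String} {n m : Nat} {i j : Int} {q : Int × Int}
    (h : pvReach factory n i j = some q) (hm : m ≤ n) :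
    ∃ r, pvReach factory m i j = some r ∧ pvReach factory (n - m) r.1 r.2 = some q := by
  rw [show n = m + (n - m) from by omega, pvReach_add] at h
  cases hr : pvReach factory m i j with
  | none => rw [hr] at h; simp at h
  | some r => rw [hr] at h; simp at h; exact ⟨r, rfl, h⟩

theorem pvReach_succ_right {factory : List String} {k : Nat} {i j : Int} {q w : Int × Int}
    (hr : pvReach factory k i j = some q) (hs : pvStep factory q.1 q.2 = .inr w) :
    pvReach factory (k + 1) i j = some w := by
  rw [pvReach_add factory k, hr]
  simpa using pvStep_reach_one hs

/-- Consecutive trajectory points determine the step between them. -/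
theorem pvReach_consec {factory : List String} {m : Nat} {q w : Int × Int}
    (hq : pvReach factory m 0 0 = some q) (hw : pvReach factory (m + 1) 0 0 = some w) :
    pvStep factory q.1 q.2 = .inr w := by
  rw [pvReach_add factory m, hq] at hw
  exact pvReach_one (by simpa using hw)

theorem pvCnt_terminal (factory : List String) : ∀ (t fuel : Nat) (i j : Int)
    (p : Int × Int) (v : String), pvReach factory t i j = some p →
    pvStep factory p.1 p.2 = .inl v → t < fuel → pvCnt factory fuel i j = v := by
  intro t
  induction t with
  | zero =>
    intro fuel i j p v hr hs hlt
    obtain ⟨fuel, rfl⟩ : ∃ f, fuel = f + 1 := ⟨fuel - 1, by omega⟩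
    simp [pvReach] at hr
    obtain rfl : p = (i, j) := hr.symm
    rw [pvCnt_succ, show pvStep factory i j = Sum.inl v from hs]
  | succ t ih =>
    intro fuel i j p v hr hs hlt
    obtain ⟨fuel, rfl⟩ : ∃ f, fuel = f + 1 := ⟨fuel - 1, by omega⟩
    rw [pvReach] at hr
    cases hst : pvStep factory i j with
    | inl w => rw [hst] at hr; exact absurd hr (by simp)
    | inr q =>
      rw [hst] at hr
      rw [pvCnt_succ, hst]
      exact ih fuel q.1 q.2 p v hr hs (by omega)

theorem pvCnt_loop_of_reach (factory : List String) : ∀ (fuel : Nat) (i j : Int) (q : Int × Int),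
    pvReach factory fuel i j = some q → pvCnt factory fuel i j = "loop" := by
  intro fuel
  induction fuel with
  | zero => intro i j q _; rfl
  | succ fuel ih =>
    intro i j q hr
    rw [pvReach] at hr
    cases hst : pvStep factory i j with
    | inl w => rw [hst] at hr; exact absurd hr (by simp)
    | inr p =>
      rw [hst] at hr
      rw [pvCnt_succ, hst]
      exact ih p.1 p.2 q hr

/-- Rotating a cycle: if (i,j) steps to p and (i,j) lies on a cycle of length k, so does p. -/
theorem pvCycle_rotate (factory : List String) (k : Nat) (i j : Int) (p : Int × Int)
    (hs : pvStep factory i j = .inr p)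
    (hc : pvReach factory k i j = some (i, j)) :
    pvReach factory k p.1 p.2 = some p := by
  rcases Nat.eq_zero_or_pos k with rfl | hk
  · rfl
  obtain ⟨k', rfl⟩ : ∃ k', k = k' + 1 := ⟨k - 1, by omega⟩
  rw [pvReach, hs] at hc
  simp at hc
  have := pvReach_add factory k' 1 p.1 p.2
  rw [hc] at this
  simpa [pvStep_reach_one hs] using this

/-- Every point reached from a cycle point is itself on a cycle of the same length. -/
theorem pvCycle_chain (factory : List String) (c : Nat) (hcpos : 0 < c) : ∀ (m : Nat) (i j : Int),
    pvReach factory c i j = some (i, j) →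
    ∃ q, pvReach factory m i j = some q ∧ pvReach factory c q.1 q.2 = some q := by
  intro m
  induction m with
  | zero => intro i j hc; exact ⟨(i, j), rfl, hc⟩
  | succ m ih =>
    intro i j hc
    obtain ⟨c', rfl⟩ : ∃ c', c = c' + 1 := ⟨c - 1, by omega⟩
    have hc' := hc
    rw [pvReach] at hc'
    cases hst : pvStep factory i j with
    | inl w => rw [hst] at hc'; exact absurd hc' (by simp)
    | inr p =>
      have hcyc : pvReach factory (c' + 1) p.1 p.2 = some p :=
        pvCycle_rotate factory (c' + 1) i j p hst hc
      obtain ⟨q, hq, hqc⟩ := ih p.1 p.2 (by exact hcyc)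
      refine ⟨q, ?_, hqc⟩
      rw [pvReach, hst]
      exact hq

/-- A cycle point's step is never terminal. -/
theorem pvCycle_step_inr {factory : List String} {c : Nat} {p : Int × Int}
    (hcpos : 0 < c) (hc : pvReach factory c p.1 p.2 = some p) :
    ∃ r, pvStep factory p.1 p.2 = .inr r := by
  obtain ⟨c', rfl⟩ : ∃ c', c = c' + 1 := ⟨c - 1, by omega⟩
  rw [pvReach] at hc
  cases hst : pvStep factory p.1 p.2 with
  | inl w => rw [hst] at hc; exact absurd hc (by simp)
  | inr r => exact ⟨r, rfl⟩

/-- A cell on a cycle never reaches a terminal verdict: pvCnt yields "loop" for any fuel. -/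
theorem pvCycle_loop (factory : List String) :
    ∀ (m k : Nat) (i j : Int), 0 < k → pvReach factory k i j = some (i, j) →
    pvCnt factory m i j = "loop" := by
  intro m k i j hk hc
  obtain ⟨q, hq, _⟩ := pvCycle_chain factory k hk m i j hc
  exact pvCnt_loop_of_reach factory m i j q hq

/-- All in-bounds cells, as a list, starting at row index `base`. -/
def pvAllPosAux : List String → Int → List (Int × Int)
  | [], _ => []
  | r :: rs, base => (List.range r.toList.length).map (fun b => (base, Int.ofNat b)) ++ pvAllPosAux rs (base + 1)

theorem pvAllPosAux_length (rs : List String) : ∀ base,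
    (pvAllPosAux rs base).length = (rs.map (fun r => r.toList.length)).sum := by
  induction rs with
  | nil => intro base; rfl
  | cons r rs ih => intro base; simp [pvAllPosAux, ih]

theorem pvMem_allPosAux (rs : List String) : ∀ (base i j : Int),
    0 ≤ i → i < (rs.length : Int) → 0 ≤ j →
    j < (((rs.getD i.toNat "").toList.length : Int)) →
    (base + i, j) ∈ pvAllPosAux rs base := by
  induction rs with
  | nil => intro base i j _ h; simp at h; omega
  | cons r rs ih =>
    intro base i j hi0 hilen hj0 hjlen
    rw [pvAllPosAux]
    rcases eq_or_lt_of_le hi0 with h0 | hpos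
    · apply List.mem_append_left
      have hi : i = 0 := h0.symm
      subst hi
      refine List.mem_map.2 ⟨j.toNat, ?_, ?_⟩
      · simp only [Int.toNat_zero, List.getD_cons_zero] at hjlen
        have hlt : j.toNat < r.toList.length := by omega
        exact List.mem_range.2 hlt
      · simp; omega
    · apply List.mem_append_right
      have h1 : (base + 1) + (i - 1) = base + i := by ring
      have h2 : (i - 1).toNat = i.toNat - 1 := by omega
      have h3 : (rs.getD (i - 1).toNat "") = ((r :: rs).getD i.toNat "") := by
        rw [h2]
        rcases Nat.exists_eq_succ_of_ne_zero (n := i.toNat) (by omega) with ⟨m, hm⟩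
        simp [hm, List.getD]
      have := ih (base + 1) (i - 1) j (by omega) (by simp at hilen ⊢; omega) hj0 (h3 ▸ hjlen)
      rwa [h1] at this

/-- Pigeonhole: a duplicate-free list of in-bounds cells has at most (cell count) elements. -/
theorem pvPigeonhole (factory : List String) (l : List (Int × Int))
    (hnd : l.Nodup) (hib : ∀ p ∈ l, pvInB factory p.1 p.2) :
    l.length ≤ (factory.map (fun r => r.toList.length)).sum := by
  have hsub : l ⊆ pvAllPosAux factory 0 := by
    intro p hp
    obtain ⟨i, j⟩ := p
    obtain ⟨h1, h2, h3, h4⟩ := hib (i, j) hp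
    have := pvMem_allPosAux factory 0 i j h1 h2 h3 h4
    simpa using this
  calc l.length ≤ (pvAllPosAux factory 0).length := (List.subperm_of_subset hnd hsub).length_le
    _ = _ := pvAllPosAux_length factory 0

/-- A's visited-set run equals the counted walk at equal fuel: every visited cell is
in-bounds and walks back to the current cell, so fuel + |visited| above the cell count
keeps A from exhausting fuel except on a genuine cycle. -/
theorem pvMain (factory : List String) : ∀ (fuel : Nat) (visited : PySem.Set (Int × Int)) (i j : Int),
    visited.Nodup →
    (∀ p ∈ visited, pvInB factory p.1 p.2 ∧ ∃ k, 0 < k ∧ pvReach factory k p.1 p.2 = some (i, j)) →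
    (factory.map (fun r => r.toList.length)).sum + 1 ≤ fuel + visited.length →
    pvRunA factory fuel visited i j = pvCnt factory fuel i j := by
  intro fuel
  induction fuel with
  | zero =>
    intro visited i j hnd hinv hfuel
    exfalso
    have := pvPigeonhole factory visited hnd (fun p hp => (hinv p hp).1)
    omega
  | succ fuel ih =>
    intro visited i j hnd hinv hfuel
    rw [pvCnt_succ]
    by_cases hib : pvInB factory i j
    · have hA : pvRunA factory (fuel + 1) visited i j =
        (if visited.contains (i, j) then "loop"
         else
           let visited' := PySem.Set.add visited (i, j)
           let c := (factory.getD i.toNat "").toList.getD j.toNat ' '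
           if c = '.' then "completed"
           else if c = '>' then pvRunA factory fuel visited' i (j + 1)
           else if c = '<' then pvRunA factory fuel visited' i (j - 1)
           else if c = 'v' then pvRunA factory fuel visited' (i + 1) j
           else pvRunA factory fuel visited' (i - 1) j) := by
        rw [pvRunA]; rw [if_pos (by exact hib)]
      rw [hA]
      by_cases hmem : (i, j) ∈ visited
      · -- current cell already visited: a genuine cycle, the counted walk loops out of fuel
        rw [if_pos (by simpa using hmem)]
        obtain ⟨_, k, hk, hreach⟩ := hinv (i, j) hmem
        have hreach' : pvReach factory k i j = some (i, j) := hreach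
        cases hst : pvStep factory i j with
        | inl s =>
          exfalso
          obtain ⟨k', rfl⟩ : ∃ k', k = k' + 1 := ⟨k - 1, by omega⟩
          rw [pvReach, hst] at hreach'
          simp at hreach'
        | inr p =>
          have hcyc : pvReach factory k p.1 p.2 = some (p.1, p.2) :=
            pvCycle_rotate factory k i j p hst hreach'
          simpa using (pvCycle_loop factory fuel k p.1 p.2 hk hcyc).symm
      · rw [if_neg (by simpa using hmem)]
        have hadd : PySem.Set.add visited (i, j) = visited ++ [(i, j)] := by
          simp [PySem.Set.add, PySem.Set.contains, hmem]
        have hnd' : (visited ++ [(i, j)]).Nodup := by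
          rw [List.nodup_append]
          refine ⟨hnd, List.nodup_singleton _, ?_⟩
          intro x hx b hb
          have hb2 : b = (i, j) := List.mem_singleton.1 hb
          subst hb2
          exact fun h => hmem (h ▸ hx)
        have hupd : ∀ a b : Int, pvStep factory i j = .inr (a, b) →
            ∀ p ∈ visited ++ [(i, j)], pvInB factory p.1 p.2 ∧
              ∃ k, 0 < k ∧ pvReach factory k p.1 p.2 = some (a, b) := by
          intro a b hst p hp
          rcases List.mem_append.1 hp with hp | hp
          · obtain ⟨hpib, k, hk, hr⟩ := hinv p hp
            exact ⟨hpib, k + 1, by omega, pvReach_succ_right hr (by exact hst)⟩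
          · simp at hp
            subst hp
            exact ⟨hib, 1, one_pos, by simpa using pvStep_reach_one hst⟩
        have hrec : ∀ a b : Int, pvStep factory i j = .inr (a, b) →
            pvRunA factory fuel (PySem.Set.add visited (i, j)) a b = pvCnt factory fuel a b := by
          intro a b hst
          rw [hadd]
          exact ih (visited ++ [(i, j)]) a b hnd' (hupd a b hst) (by simp at hfuel ⊢; omega)
        by_cases h1 : (factory.getD i.toNat "").toList.getD j.toNat ' ' = '.'
        · have hst : pvStep factory i j = Sum.inl "completed" := by
            rw [pvStep_in factory i j hib, if_pos h1]
          simp only []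
          rw [if_pos h1, hst]
        · by_cases h2 : (factory.getD i.toNat "").toList.getD j.toNat ' ' = '>'
          · have hst : pvStep factory i j = Sum.inr (i, j + 1) := by
              rw [pvStep_in factory i j hib, if_neg h1, if_pos h2]
            simp only []
            rw [if_neg h1, if_pos h2, hst]
            exact hrec i (j + 1) hst
          · by_cases h3 : (factory.getD i.toNat "").toList.getD j.toNat ' ' = '<'
            · have hst : pvStep factory i j = Sum.inr (i, j - 1) := by
                rw [pvStep_in factory i j hib, if_neg h1, if_neg h2, if_pos h3]
              simp only []
              rw [if_neg h1, if_neg h2, if_pos h3, hst]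
              exact hrec i (j - 1) hst
            · by_cases h4 : (factory.getD i.toNat "").toList.getD j.toNat ' ' = 'v'
              · have hst : pvStep factory i j = Sum.inr (i + 1, j) := by
                  rw [pvStep_in factory i j hib, if_neg h1, if_neg h2, if_neg h3, if_pos h4]
                simp only []
                rw [if_neg h1, if_neg h2, if_neg h3, if_pos h4, hst]
                exact hrec (i + 1) j hst
              · have hst : pvStep factory i j = Sum.inr (i - 1, j) := by
                  rw [pvStep_in factory i j hib, if_neg h1, if_neg h2, if_neg h3, if_neg h4]
                simp only []
                rw [if_neg h1, if_neg h2, if_neg h3, if_neg h4, hst]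
                exact hrec (i - 1) j hst
    · rw [pvRunA, if_neg (by exact hib), pvStep_out factory i j hib]

theorem pvFloyd_succ (factory : List String) (fuel : Nat) (slow fast : Int × Int) :
    pvFloyd factory (fuel + 1) slow fast =
      (match pvStep factory fast.1 fast.2 with
       | .inl v => v
       | .inr f1 =>
         match pvStep factory f1.1 f1.2 with
         | .inl v => v
         | .inr f2 =>
           match pvStep factory slow.1 slow.2 with
           | .inl v => v
           | .inr s1 => if s1 = f2 then "loop" else pvFloyd factory fuel s1 f2) := rfl

/-- If the trajectory never hits a terminal verdict, Floyd returns "loop" once a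
self-meeting index exists within the remaining fuel. -/
theorem pvFloydLoop (factory : List String) : ∀ (fuel n : Nat) (s f : Int × Int),
    (∀ m, ∃ q, pvReach factory m 0 0 = some q) →
    pvReach factory n 0 0 = some s → pvReach factory (2*n) 0 0 = some f →
    (∃ k, n < k ∧ k ≤ n + fuel ∧ ∃ p, pvReach factory k 0 0 = some p ∧ pvReach factory (2*k) 0 0 = some p) →
    pvFloyd factory fuel s f = "loop" := by
  intro fuel
  induction fuel with
  | zero => rintro n s f _ _ _ ⟨k, h1, h2, _⟩; omega
  | succ fuel ih =>
    rintro n s f htot hs hf ⟨k, hk1, hk2, p, hp1, hp2⟩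
    obtain ⟨w1, hw1⟩ := htot (2*n + 1)
    have hstf : pvStep factory f.1 f.2 = .inr w1 := pvReach_consec hf hw1
    obtain ⟨w2, hw2'⟩ := htot (2*n + 1 + 1)
    have hstf1 : pvStep factory w1.1 w1.2 = .inr w2 := pvReach_consec hw1 hw2'
    obtain ⟨w3, hw3⟩ := htot (n + 1)
    have hsts : pvStep factory s.1 s.2 = .inr w3 := pvReach_consec hs hw3
    rw [pvFloyd_succ]
    simp only [hstf, hstf1, hsts]
    by_cases heq : w3 = w2
    · rw [if_pos heq]
    · rw [if_neg heq]
      apply ih (n + 1) w3 w2 htot hw3 (by rw [show 2*(n+1) = 2*n+1+1 from by ring]; exact hw2')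
      refine ⟨k, ?_, by omega, p, hp1, hp2⟩
      rcases Nat.lt_or_ge (n + 1) k with h | h
      · exact h
      · exfalso
        have hkn : k = n + 1 := by omega
        subst hkn
        rw [hw3] at hp1
        have hw3p : w3 = p := Option.some.inj hp1
        rw [show 2*(n+1) = 2*n+1+1 from by ring, hw2'] at hp2
        exact heq (hw3p.trans (Option.some.inj hp2).symm)

/-- If the trajectory hits a terminal verdict, Floyd returns that verdict. -/
theorem pvFloydTerm (factory : List String) : ∀ (fuel n : Nat) (s f : Int × Int) (t : Nat)
    (p : Int × Int) (v : String),
    pvReach factory t 0 0 = some p → pvStep factory p.1 p.2 = .inl v →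
    pvReach factory n 0 0 = some s → pvReach factory (2*n) 0 0 = some f →
    2*n ≤ t → t < 2*n + 2*fuel → pvFloyd factory fuel s f = v := by
  intro fuel
  induction fuel with
  | zero => intro n s f t p v _ _ _ _ h1 h2; omega
  | succ fuel ih =>
    intro n s f t p v hrt hterm hs hf h2n hlt
    by_cases ht0 : t = 2*n
    · subst ht0
      rw [hrt] at hf
      obtain rfl : p = f := Option.some.inj hf
      rw [pvFloyd_succ]
      simp only [hterm]
    · obtain ⟨f1, hf1, _⟩ := pvReach_split hrt (show 2*n + 1 ≤ t by omega)
      have hstf : pvStep factory f.1 f.2 = .inr f1 := pvReach_consec hf hf1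
      by_cases ht1 : t = 2*n + 1
      · subst ht1
        rw [hrt] at hf1
        obtain rfl : p = f1 := Option.some.inj hf1
        rw [pvFloyd_succ]
        simp only [hstf, hterm]
      · obtain ⟨f2, hf2, _⟩ := pvReach_split hrt (show 2*n + 1 + 1 ≤ t by omega)
        have hstf1 : pvStep factory f1.1 f1.2 = .inr f2 := pvReach_consec hf1 hf2
        obtain ⟨s1, hs1, _⟩ := pvReach_split hrt (show n + 1 ≤ t by omega)
        have hsts : pvStep factory s.1 s.2 = .inr s1 := pvReach_consec hs hs1
        rw [pvFloyd_succ]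
        simp only [hstf, hstf1, hsts]
        by_cases heq : s1 = f2
        · exfalso
          have hf2' : pvReach factory (2*n + 1 + 1) 0 0 = some s1 := by rw [heq]; exact hf2
          have hcyc : pvReach factory (n + 1) s1.1 s1.2 = some s1 := by
            have hadd := pvReach_add factory (n + 1) (n + 1) 0 0
            rw [show (n+1) + (n+1) = 2*n+1+1 from by ring, hf2', hs1] at hadd
            simpa using hadd.symm
          obtain ⟨r, hr1, hr2⟩ := pvReach_split hrt (show 2*n + 1 + 1 ≤ t by omega)
          rw [hf2'] at hr1
          rw [← Option.some.inj hr1] at hr2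
          obtain ⟨qq, hqq, hqqc⟩ :=
            pvCycle_chain factory (n + 1) (by omega) (t - (2*n + 1 + 1)) s1.1 s1.2 (by exact hcyc)
          rw [hr2] at hqq
          have hpq : p = qq := Option.some.inj hqq
          obtain ⟨rr, hrr⟩ := pvCycle_step_inr (show 0 < n + 1 by omega) hqqc
          rw [← hpq] at hrr
          rw [hrr] at hterm
          exact absurd hterm (by simp)
        · rw [if_neg heq]
          exact ih (n + 1) s1 f2 t p v hrt hterm hs1
            (by rw [show 2*(n+1) = 2*n+1+1 from by ring]; exact hf2) (by omega) (by omega)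

/-- The trajectory is total as long as no terminal verdict occurred before. -/
theorem pvTotal (factory : List String) : ∀ (fuel : Nat),
    (∀ t, t < fuel → ∀ p, pvReach factory t 0 0 = some p → ∀ v, pvStep factory p.1 p.2 ≠ Sum.inl v) →
    ∃ q, pvReach factory fuel 0 0 = some q := by
  intro fuel
  induction fuel with
  | zero => intro _; exact ⟨(0, 0), rfl⟩
  | succ fuel ih =>
    intro H
    obtain ⟨q, hq⟩ := ih (fun t ht => H t (by omega))
    cases hs : pvStep factory q.1 q.2 with
    | inl v => exact absurd hs (H fuel (by omega) q hq v)
    | inr r => exact ⟨r, pvReach_succ_right hq hs⟩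

/-- Floyd's cycle detection agrees with the counted walk at fuel = cell count + 1. -/
theorem pvFloyd_eq_pvCnt (factory : List String) :
    pvFloyd factory ((factory.map (fun r => r.toList.length)).sum + 1) (0, 0) (0, 0)
      = pvCnt factory ((factory.map (fun r => r.toList.length)).sum + 1) 0 0 := by
  set N := (factory.map (fun r => r.toList.length)).sum with hN
  by_cases hter : ∃ t, t ≤ N ∧ ∃ p v, pvReach factory t 0 0 = some p ∧ pvStep factory p.1 p.2 = Sum.inl v
  · obtain ⟨t, ht, p, v, hr, hs⟩ := hter
    rw [pvCnt_terminal factory t (N + 1) 0 0 p v hr hs (by omega)]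
    exact pvFloydTerm factory (N + 1) 0 (0, 0) (0, 0) t p v hr hs rfl rfl (by omega) (by omega)
  · push_neg at hter
    obtain ⟨q, hq⟩ := pvTotal factory (N + 1)
      (fun t ht p hp v hv => hter t (by omega) p v hp hv)
    rw [pvCnt_loop_of_reach factory (N + 1) 0 0 q hq]
    -- positions 0..N of the trajectory, all in-bounds
    have hg : ∀ m, m ≤ N → ∃ r, pvReach factory m 0 0 = some r ∧ pvInB factory r.1 r.2 := by
      intro m hm
      obtain ⟨r, hr1, hr2⟩ := pvReach_split hq (show m ≤ N + 1 by omega)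
      obtain ⟨r1, hr11, _⟩ := pvReach_split hr2 (show 1 ≤ N + 1 - m by omega)
      exact ⟨r, hr1, pvStep_inB (pvReach_one hr11)⟩
    -- pigeonhole: a repeated trajectory position exists among indices 0..N
    have hdup : ∃ a b, a < b ∧ b ≤ N ∧ ∃ pa, pvReach factory a 0 0 = some pa ∧
        pvReach factory b 0 0 = some pa := by
      set g : Nat → Int × Int := fun m => (pvReach factory m 0 0).getD (0, 0) with hgdef
      have hnn : ¬ (List.map g (List.range (N + 1))).Nodup := by
        intro hnd
        have hlen := pvPigeonhole factory (List.map g (List.range (N + 1))) hnd ?_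
        · rw [List.length_map, List.length_range] at hlen; omega
        · intro p hp
          obtain ⟨m, hm, hgm⟩ := List.mem_map.1 hp
          obtain ⟨r, hr, hrib⟩ := hg m (Nat.lt_succ_iff.1 (List.mem_range.1 hm))
          have hpr : p = r := by rw [← hgm, hgdef]; simp [hr]
          rw [hpr]; exact hrib
      have hninj : ¬ (∀ x ∈ List.range (N + 1), ∀ y ∈ List.range (N + 1), g x = g y → x = y) :=
        fun hinj => hnn ((List.nodup_map_iff_inj_on (List.nodup_range)).2 hinj)
      push_neg at hninj
      obtain ⟨x, hx, y, hy, hgxy, hxy⟩ := hninj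
      have hx' := Nat.lt_succ_iff.1 (List.mem_range.1 hx)
      have hy' := Nat.lt_succ_iff.1 (List.mem_range.1 hy)
      rcases Nat.lt_or_ge x y with hlt | hge
      · obtain ⟨pa, hpa, _⟩ := hg x hx'
        obtain ⟨pb, hpb, _⟩ := hg y hy'
        refine ⟨x, y, hlt, hy', pa, hpa, ?_⟩
        have : pa = pb := by rw [hgdef] at hgxy; simpa [hpa, hpb] using hgxy
        rw [this]; exact hpb
      · have hlt : y < x := by omega
        obtain ⟨pa, hpa, _⟩ := hg y hy'
        obtain ⟨pb, hpb, _⟩ := hg x hx'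
        refine ⟨y, x, hlt, hx', pa, hpa, ?_⟩
        have : pa = pb := by rw [hgdef] at hgxy; simpa [hpa, hpb] using hgxy.symm
        rw [this]; exact hpb
    obtain ⟨a, b, hab, hbN, pa, hpa, hpb⟩ := hdup
    have hcpos : 0 < b - a := by omega
    have hcyc : pvReach factory (b - a) pa.1 pa.2 = some pa := by
      have hadd := pvReach_add factory a (b - a) 0 0
      rw [show a + (b - a) = b from by omega, hpa, hpb] at hadd
      simpa using hadd.symm
    -- totality of the trajectory
    have htot : ∀ m, ∃ w, pvReach factory m 0 0 = some w := by
      intro m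
      rcases Nat.lt_or_ge a m with hm | hm
      · obtain ⟨w, hw, _⟩ := pvCycle_chain factory (b - a) hcpos (m - a) pa.1 pa.2 (by exact hcyc)
        refine ⟨w, ?_⟩
        rw [show m = a + (m - a) from by omega, pvReach_add, hpa]
        simpa using hw
      · obtain ⟨r, hr, _⟩ := pvReach_split hpa hm
        exact ⟨r, hr⟩
    -- periodicity beyond index a
    have hper : ∀ m, a ≤ m → pvReach factory (m + (b - a)) 0 0 = pvReach factory m 0 0 := by
      intro m hm
      obtain ⟨w, hw, hwc⟩ := pvCycle_chain factory (b - a) hcpos (m - a) pa.1 pa.2 (by exact hcyc)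
      have h1 : pvReach factory m 0 0 = some w := by
        rw [show m = a + (m - a) from by omega, pvReach_add, hpa]
        simpa using hw
      have h2 : pvReach factory (m + (b - a)) 0 0 = some w := by
        rw [pvReach_add factory m, h1]
        simpa using hwc
      rw [h1, h2]
    have hperj : ∀ (jj m : Nat), a ≤ m →
        pvReach factory (m + jj * (b - a)) 0 0 = pvReach factory m 0 0 := by
      intro jj
      induction jj with
      | zero => intro m _; simp
      | succ jj ihj =>
        intro m hm
        rw [show m + (jj + 1) * (b - a) = (m + (b - a)) + jj * (b - a) from by ring]
        rw [ihj (m + (b - a)) (by omega), hper m hm]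
    -- the self-meeting index k: the smallest multiple of the period ≥ max a 1
    set x := max a 1 with hx
    set qn := (x + (b - a) - 1) / (b - a) with hqn
    set k := (b - a) * qn with hk
    have hdm := Nat.div_add_mod (x + (b - a) - 1) (b - a)
    have hmlt := Nat.mod_lt (x + (b - a) - 1) hcpos
    have hkb : x ≤ k ∧ k ≤ x + (b - a) - 1 := by
      rw [hk, hqn]
      generalize hA : (b - a) * ((x + (b - a) - 1) / (b - a)) = A at hdm ⊢
      omega
    have hka : a ≤ k := by omega
    have hk1 : 1 ≤ k := by omega
    have hkN : k ≤ N := by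
      rcases Nat.eq_zero_or_pos a with ha0 | hapos
      · subst ha0; omega
      · omega
    obtain ⟨pk, hpk⟩ := htot k
    have hpk2 : pvReach factory (2 * k) 0 0 = some pk := by
      rw [show 2 * k = k + qn * (b - a) from by rw [hk]; ring]
      rw [hperj qn k hka]
      exact hpk
    exact pvFloydLoop factory (N + 1) 0 (0, 0) (0, 0) htot rfl rfl
      ⟨k, by omega, by omega, pk, hpk, hpk2⟩

-- ===== VERDICT (by name: the statement is the Claim_ definition above) =====
theorem run_factory_spec : Claim_equal_run_factory := by
  intro factory _
  unfold Spec_run_factory run_factory run_factory_alt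
  rw [pvMain factory _ PySem.Set.empty 0 0 (by simp [PySem.Set.empty])
    (by intro p hp; simp [PySem.Set.empty] at hp) (by simp [PySem.Set.empty])]
  exact (pvFloyd_eq_pvCnt factory).symm
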